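-- pv_equiv track=rewrite | github.com/gaabrielfranco/ia-moba-tcc | pipeline_v2/feature_selection/test_mutation.py | analyse_chromossome
-- ===== SOURCE A (Python) =====
-- def analyse_chromossome(individual):
--     item_count = 0
--     zeros = []
--     ones = []
--     for i,item in enumerate(individual):
--         item_count += item
--         if item:
--             ones.append(i)
--         else:
--             zeros.append(i)
--
--     return item_count, ones, zeros
-- ===== SOURCE B (Python) =====
-- def analyse_chromossome(individual):
--     # divide and conquer over index ranges: combine (sum, ones, zeros) of halves
--     def go(lo, hi):
--         if hi <= lo:
--             return 0, [], []
--         if hi == lo + 1: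
--             x = individual[lo]
--             if x:
--                 return x, [lo], []
--             return x, [], [lo]
--         mid = (lo + hi) // 2
--         c1, o1, z1 = go(lo, mid)
--         c2, o2, z2 = go(mid, hi)
--         return c1 + c2, o1 + o2, z1 + z2
--     return go(0, len(individual))
-- ===== Notes on version B (the rewrite author's own statement) =====
-- stated objective: alternative
-- what changed: The single left-to-right fused loop is replaced by a divide-and-conquer recursion that splits the index range in half, solves each half independently, and merges the (sum, ones, zeros) triples by addition and concatenation.
import Mathlib
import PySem

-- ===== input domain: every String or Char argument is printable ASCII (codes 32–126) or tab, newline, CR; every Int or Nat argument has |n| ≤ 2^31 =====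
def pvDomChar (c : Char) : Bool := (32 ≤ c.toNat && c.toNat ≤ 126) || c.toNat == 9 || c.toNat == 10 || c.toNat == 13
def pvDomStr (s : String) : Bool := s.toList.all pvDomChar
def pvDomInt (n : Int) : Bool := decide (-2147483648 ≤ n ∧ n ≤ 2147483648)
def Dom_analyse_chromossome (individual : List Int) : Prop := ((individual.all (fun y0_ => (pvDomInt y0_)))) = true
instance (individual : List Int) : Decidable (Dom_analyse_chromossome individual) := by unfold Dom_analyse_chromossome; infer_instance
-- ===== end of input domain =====

-- B replaces A's single fused left-to-right loop with a divide-and-conquer recursion over index ranges, merging half-results by addition/concatenation; objective: alternative, same cost.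


-- ===== PORT A =====
def analyse_chromossome (individual : List Int) : Int × List Int × List Int :=
  -- one fused loop: item_count += item; append i to ones if item else to zeros
  (PySem.List.enumerate individual).foldl
    (fun (s : Int × List Int × List Int) (p : Int × Int) =>
      if p.2 ≠ 0 then (s.1 + p.2, s.2.1 ++ [p.1], s.2.2)
      else (s.1 + p.2, s.2.1, s.2.2 ++ [p.1]))
    (0, [], [])

-- ===== PORT B =====
-- helper go(lo, hi) of Source B; lo/hi are Nat (in Python they only take values in 0..len, so this is exact),
-- and individual[lo] is in range whenever it is read (lo < hi ≤ len), so getD's default is never used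
def pvGo (individual : List Int) (lo hi : Nat) : Int × List Int × List Int :=
  if hi ≤ lo then (0, [], [])
  else if hi = lo + 1 then
    let x := individual.getD lo 0
    if x ≠ 0 then (x, [(lo : Int)], []) else (x, [], [(lo : Int)])
  else
    let mid := (lo + hi) / 2
    let r1 := pvGo individual lo mid
    let r2 := pvGo individual mid hi
    (r1.1 + r2.1, r1.2.1 ++ r2.2.1, r1.2.2 ++ r2.2.2)
termination_by hi - lo
decreasing_by all_goals omega

def analyse_chromossome_alt (individual : List Int) : Int × List Int × List Int :=
  pvGo individual 0 individual.length

-- ===== PRECONDITION & SPEC =====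
def Spec_analyse_chromossome (individual : List Int) (out : Int × List Int × List Int) : Prop := out = analyse_chromossome_alt individual
instance (individual : List Int) (out : Int × List Int × List Int) : Decidable (Spec_analyse_chromossome individual out) := by unfold Spec_analyse_chromossome; infer_instance

-- ===== CLAIM (what is proved, stated in full; the proofs are below) =====
def Claim_equal_analyse_chromossome : Prop := ∀ (individual : List Int), Dom_analyse_chromossome individual → Spec_analyse_chromossome individual (analyse_chromossome individual)

-- ===== LEMMAS AND PROOFS =====

-- reference linear characterisation used only by the proofs (prepend-style, start index i)
def pvLin (l : List Int) (i : Int) : Int × List Int × List Int :=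
  match l with
  | [] => (0, [], [])
  | x :: t =>
    let r := pvLin t (i + 1)
    if x ≠ 0 then (r.1 + x, i :: r.2.1, r.2.2) else (r.1 + x, r.2.1, i :: r.2.2)

theorem pvLin_append (a b : List Int) (i : Int) :
    pvLin (a ++ b) i =
      ((pvLin a i).1 + (pvLin b (i + a.length)).1,
       (pvLin a i).2.1 ++ (pvLin b (i + a.length)).2.1,
       (pvLin a i).2.2 ++ (pvLin b (i + a.length)).2.2) := by
  induction a generalizing i with
  | nil => simp [pvLin]
  | cons x t ih =>
    have harith : i + 1 + (t.length : Int) = i + (t.length + 1 : Int) := by ring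
    by_cases h : x = 0 <;>
      simp [pvLin, ih, h, harith, add_comm, add_assoc]

-- A's fused loop with general accumulator equals the prepend-style linear pass
theorem foldl_enum_eq_pvLin (l : List Int) (s c : Int) (os zs : List Int) :
    (PySem.List.enumerate l s).foldl
      (fun (st : Int × List Int × List Int) (p : Int × Int) =>
        if p.2 ≠ 0 then (st.1 + p.2, st.2.1 ++ [p.1], st.2.2)
        else (st.1 + p.2, st.2.1, st.2.2 ++ [p.1]))
      (c, os, zs)
    = (c + (pvLin l s).1, os ++ (pvLin l s).2.1, zs ++ (pvLin l s).2.2) := by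
  induction l generalizing s c os zs with
  | nil => simp [pvLin, PySem.List.enumerate_nil]
  | cons x t ih =>
    rw [PySem.List.enumerate_cons, List.foldl_cons]
    by_cases h : x = 0
    · rw [if_neg (by simp [h]), ih]
      simp [pvLin, h]
    · rw [if_pos (by simp [h]), ih]
      simp [pvLin, h]
      omega

-- divide and conquer computes the linear pass on the index segment [lo, hi)
theorem pvGo_eq_pvLin (l : List Int) :
    ∀ (n lo hi : Nat), hi - lo = n → hi ≤ l.length →
      pvGo l lo hi = pvLin ((l.drop lo).take (hi - lo)) (lo : Int) := by
  intro n
  induction n using Nat.strong_induction_on with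
  | _ n ih =>
    intro lo hi hn hhi
    rw [pvGo]
    by_cases h0 : hi ≤ lo
    · have he : hi - lo = 0 := by omega
      rw [if_pos h0, he]
      simp [pvLin]
    · rw [if_neg h0]
      by_cases h1 : hi = lo + 1
      · have hlt : lo < l.length := by omega
        have hdrop : l.drop lo = l[lo] :: l.drop (lo + 1) := List.drop_eq_getElem_cons hlt
        have h1' : hi - lo = 1 := by omega
        have hseg : (l.drop lo).take 1 = [l[lo]] := by rw [hdrop]; rfl
        have hget : l.getD lo 0 = l[lo] := by
          simp [List.getD, List.getElem?_eq_getElem hlt]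
        rw [if_pos h1, h1', hseg]
        by_cases hx : l[lo] = 0 <;>
          simp [pvLin, List.getElem?_eq_getElem hlt, hx]
      · rw [if_neg h1]
        dsimp only
        have hm1 : lo < (lo + hi) / 2 := by omega
        have hm2 : (lo + hi) / 2 < hi := by omega
        rw [ih ((lo + hi) / 2 - lo) (by omega) lo ((lo + hi) / 2) rfl (by omega),
            ih (hi - (lo + hi) / 2) (by omega) ((lo + hi) / 2) hi rfl hhi]
        have hsplit : (l.drop lo).take (hi - lo)
            = (l.drop lo).take ((lo + hi) / 2 - lo)
              ++ ((l.drop ((lo + hi) / 2)).take (hi - (lo + hi) / 2)) := by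
          have hd : hi - lo = ((lo + hi) / 2 - lo) + (hi - (lo + hi) / 2) := by omega
          rw [hd, List.take_add, List.drop_drop]
          have hadd : lo + ((lo + hi) / 2 - lo) = (lo + hi) / 2 := by omega
          rw [hadd]
        rw [hsplit, pvLin_append]
        have hlen : ((l.drop lo).take ((lo + hi) / 2 - lo)).length = (lo + hi) / 2 - lo := by
          simp
          omega
        rw [hlen]
        have hgen : ∀ (a b : Nat), a ≤ b → (a : Int) + ((b - a : Nat) : Int) = (b : Int) := by
          intro a b hab
          omega
        rw [hgen lo ((lo + hi) / 2) (Nat.le_of_lt hm1)]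

-- ===== VERDICT (by name: the statement is the Claim_ definition above) =====
theorem analyse_chromossome_spec : Claim_equal_analyse_chromossome := by
  intro individual _
  unfold Spec_analyse_chromossome analyse_chromossome analyse_chromossome_alt
  rw [foldl_enum_eq_pvLin,
      pvGo_eq_pvLin individual (individual.length - 0) 0 individual.length rfl le_rfl]
  simp
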